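-- pv_equiv track=rewrite | github.com/Reznnov/homework_numbers_Gazarov | ft_reverse_code.py | ft_bin_num
-- ===== SOURCE A (Python) =====
-- def ft_bin_num(a):
--     if a < 0:
--         a *= -1
--     desit = 1
--     it = 0
--     while a > 0:
--         it += a % 2 * desit
--         desit *= 10
--         a //= 2
--     return it
-- ===== SOURCE B (Python) =====
-- def ft_bin_num(a):
--     a = abs(a)
--     r = 0
--     for i in range(a.bit_length() - 1, -1, -1):
--         r = r * 10 + ((a >> i) & 1)
--     return r
-- ===== Notes on version B (the rewrite author's own statement) =====
-- stated objective: alternative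
-- what changed: Replaces A's least-significant-bit-first while-loop that accumulates digit times a growing power-of-ten register by a most-significant-bit-first Horner loop (r = r*10 + bit) over the bit indices from bit_length down to zero, read with shifts; no power accumulator and opposite traversal order.
import Mathlib
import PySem

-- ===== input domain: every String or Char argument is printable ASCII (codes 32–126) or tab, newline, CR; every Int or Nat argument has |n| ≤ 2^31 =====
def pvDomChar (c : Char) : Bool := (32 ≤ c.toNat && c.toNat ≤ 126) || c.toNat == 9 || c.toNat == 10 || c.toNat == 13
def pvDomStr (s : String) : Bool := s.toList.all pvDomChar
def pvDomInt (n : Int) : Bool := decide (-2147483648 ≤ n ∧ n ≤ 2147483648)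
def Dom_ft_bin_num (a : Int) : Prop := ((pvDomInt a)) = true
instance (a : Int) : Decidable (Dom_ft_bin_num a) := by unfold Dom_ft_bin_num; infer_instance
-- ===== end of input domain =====

-- B replaces A's LSB-first accumulator (digit * growing power-of-ten register) by an
-- MSB-first Horner loop (r = r*10 + bit) over range(bit_length-1, -1, -1); no speed claim.

-- ===== PORT A =====
-- the 'while a > 0: it += a % 2 * desit; desit *= 10; a //= 2' loop, state (a, desit, it)
def ftLoopA (a desit it : Int) : Int :=
  if a > 0 then
    ftLoopA (PySem.Int.floordiv a 2) (desit * 10) (it + PySem.Int.mod a 2 * desit)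
  else it
termination_by a.toNat
decreasing_by
  rename_i h
  have : PySem.Int.floordiv a 2 = a / 2 := by
    rw [PySem.Int.floordiv, Int.fdiv_eq_ediv]; norm_num
  rw [this]; omega

def ft_bin_num (a : Int) : Int :=
  let a := if a < 0 then a * (-1) else a
  ftLoopA a 1 0

-- ===== PORT B =====
def ft_bin_num_alt (a : Int) : Int :=
  -- Source B: a = abs(a); for i in range(a.bit_length() - 1, -1, -1): r = r * 10 + ((a >> i) & 1)
  -- 'a >> i' ported as '|a| >>> i.toNat': exact, every element of this range is ≥ 0
  (PySem.List.pyRange ((PySem.Int.bitLength |a| : Int) - 1) (-1) (-1)).foldl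
    (fun r i => r * 10 + PySem.Int.band (|a| >>> i.toNat) 1) 0

-- ===== PRECONDITION & SPEC =====
def Spec_ft_bin_num (a : Int) (out : Int) : Prop := out = ft_bin_num_alt a
instance (a : Int) (out : Int) : Decidable (Spec_ft_bin_num a out) := by unfold Spec_ft_bin_num; infer_instance

-- ===== CLAIM (what is proved, stated in full; the proofs are below) =====
def Claim_equal_ft_bin_num : Prop := ∀ (a : Int), Dom_ft_bin_num a → Spec_ft_bin_num a (ft_bin_num a)

-- ===== LEMMAS AND PROOFS =====

-- decimal reading of the binary digits of n (the common value of both programs)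
def pvV (n : Nat) : Int :=
  if n = 0 then 0 else 10 * pvV (n / 2) + ((n % 2 : Nat) : Int)
termination_by n
decreasing_by exact Nat.div_lt_self (Nat.pos_of_ne_zero (by assumption)) (by norm_num)

theorem pvV_zero : pvV 0 = 0 := by rw [pvV]; simp

theorem pvV_pos (n : Nat) (h : 0 < n) : pvV n = 10 * pvV (n / 2) + ((n % 2 : Nat) : Int) := by
  rw [pvV]; simp [Nat.pos_iff_ne_zero.mp h]

-- A's loop computes it + desit * pvV n
theorem ftLoopA_eq (n : Nat) : ∀ (d it : Int), ftLoopA (n : Int) d it = it + d * pvV n := by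
  induction n using Nat.strong_induction_on with
  | _ n ih =>
    intro d it
    by_cases h : 0 < n
    · rw [ftLoopA]
      have hgt : ((n : Int) > 0) := by exact_mod_cast h
      have hfd : PySem.Int.floordiv (n : Int) 2 = ((n / 2 : Nat) : Int) := by
        rw [PySem.Int.floordiv, Int.fdiv_eq_ediv]; norm_num
      have hmd : PySem.Int.mod (n : Int) 2 = ((n % 2 : Nat) : Int) := by
        rw [PySem.Int.mod, Int.fmod_eq_emod]; omega
      rw [if_pos hgt, hfd, hmd, ih (n / 2) (Nat.div_lt_self h (by norm_num))]
      rw [pvV_pos n h]; ring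
    · have hn : n = 0 := by omega
      subst hn
      rw [ftLoopA]
      simp [pvV_zero]

-- [k-1, k-2, …, 0]
def pvDesc (k : Nat) : List Int := (List.range k).map (fun j : Nat => (k : Int) - 1 - (j : Int))

theorem pvDesc_succ (k : Nat) : pvDesc (k + 1) = (k : Int) :: pvDesc k := by
  unfold pvDesc
  rw [List.range_succ_eq_map, List.map_cons, List.map_map]
  congr 1
  · push_cast; ring
  · apply List.map_congr_left
    intro j _
    simp only [Function.comp_apply]
    push_cast
    ring

theorem pyRange_desc (k : Nat) : PySem.List.pyRange ((k : Int) - 1) (-1) (-1) = pvDesc k := by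
  unfold PySem.List.pyRange pvDesc
  norm_num
  have hk : (if 0 < k then k else 0) = k := by split <;> omega
  rw [hk]
  apply List.map_congr_left
  intro j _
  push_cast
  ring

-- the key digit-splitting identity: pvV (b*2^k + c) = b*10^k + pvV c for b < 2, c < 2^k
theorem pvV_split (k : Nat) : ∀ (b c : Nat), b < 2 → c < 2 ^ k →
    pvV (b * 2 ^ k + c) = (b : Int) * 10 ^ k + pvV c := by
  induction k with
  | zero =>
    intro b c hb hc
    interval_cases c
    interval_cases b
    · simp
    · norm_num
      rw [pvV_pos 1 (by norm_num)]
      simp [pvV_zero]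
  | succ k ih =>
    intro b c hb hc
    interval_cases b
    · simp
    · have hpos : 0 < 1 * 2 ^ (k + 1) + c := by positivity
      rw [pvV_pos _ hpos]
      have h1 : (1 * 2 ^ (k + 1) + c) / 2 = 1 * 2 ^ k + c / 2 := by
        omega
      have h2 : (1 * 2 ^ (k + 1) + c) % 2 = c % 2 := by
        omega
      rw [h1, h2, ih 1 (c / 2) (by norm_num) (by omega)]
      by_cases hc0 : 0 < c
      · rw [pvV_pos c hc0]; push_cast; ring
      · have : c = 0 := by omega
        subst this
        simp [pvV_zero]
        ring
  
-- B's fold over pvDesc k computes r*10^k + pvV (n % 2^k)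
theorem foldB_eq (k : Nat) (n : Nat) : ∀ (r : Int),
    (pvDesc k).foldl (fun r i => r * 10 + PySem.Int.band ((n : Int) >>> i.toNat) 1) r
      = r * 10 ^ k + pvV (n % 2 ^ k) := by
  induction k with
  | zero =>
    intro r
    simp [pvDesc, Nat.mod_one, pvV_zero]
  | succ k ih =>
    intro r
    rw [pvDesc_succ, List.foldl_cons, ih]
    have htn : ((k : Int)).toNat = k := by omega
    have hsh : ((n : Int) >>> ((k : Nat) : Int)) = ((n >>> k : Nat) : Int) := by simp
    have hbd : PySem.Int.band ((n >>> k : Nat) : Int) 1 = (((n >>> k) % 2 : Nat) : Int) := by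
      have h := PySem.Int.band_natCast (m := n >>> k) (n := 1)
      simpa [Nat.and_one_is_mod] using h
    rw [htn, hsh, hbd]
    have hshift : n >>> k = n / 2 ^ k := Nat.shiftRight_eq_div_pow n k
    have hmod : n % 2 ^ (k + 1) = (n / 2 ^ k % 2) * 2 ^ k + n % 2 ^ k := by
      rw [Nat.mod_pow_succ]; ring
    rw [hmod, pvV_split k (n / 2 ^ k % 2) (n % 2 ^ k) (Nat.mod_lt _ (by norm_num)) (Nat.mod_lt _ (by positivity))]
    rw [hshift]
    push_cast
    ring

theorem ft_bin_num_eq_pvV (a : Int) : ft_bin_num a = pvV a.natAbs := by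
  unfold ft_bin_num
  have habs : (if a < 0 then a * (-1) else a) = ((a.natAbs : Nat) : Int) := by
    split_ifs with h <;> omega
  rw [habs, ftLoopA_eq]
  simp

theorem ft_bin_num_alt_eq_pvV (a : Int) : ft_bin_num_alt a = pvV a.natAbs := by
  unfold ft_bin_num_alt
  have habs : |a| = ((a.natAbs : Nat) : Int) := by
    rcases abs_cases a with ⟨h1, h2⟩ | ⟨h1, h2⟩ <;> omega
  rw [habs]

  have hbl : PySem.Int.bitLength ((a.natAbs : Nat) : Int) = PySem.Int.bitLength a := by
    rcases Int.natAbs_eq a with h | h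
    · rw [← h]
    · conv_rhs => rw [h]
      rw [PySem.Int.bitLength_neg]
  rw [pyRange_desc, foldB_eq]
  have hlt : a.natAbs < 2 ^ PySem.Int.bitLength ((a.natAbs : Nat) : Int) := by
    rw [hbl]; exact PySem.Int.lt_two_pow_bitLength a
  rw [Nat.mod_eq_of_lt hlt]
  simp

-- ===== VERDICT (by name: the statement is the Claim_ definition above) =====
theorem ft_bin_num_spec : Claim_equal_ft_bin_num := by
  intro a _
  unfold Spec_ft_bin_num
  rw [ft_bin_num_eq_pvV, ft_bin_num_alt_eq_pvV]
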